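-- pv_equiv track=rewrite | github.com/VESIT-CMPN-Projects/2024-25-TE08 | Sem 6/Code of Implementation/generators/generate_video.py | get_story_parts
-- ===== SOURCE A (Python) =====
-- def get_story_parts(story):
--     sentences = story.split('.')
--     sentences = [s.strip() for s in sentences if s.strip()]
--     sentences = [s + '.' for s in sentences]
--
--     n = len(sentences)
--     part1 = sentences[:n // 3 + (n % 3 > 0)]
--     part2 = sentences[len(part1):len(part1) + n // 3 + (n % 3 > 1)]
--     part3 = sentences[len(part1) + len(part2):]
--
--     parts = [part1, part2, part3]
--     parts = [' '.join(part) for part in parts]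
--     return parts
-- ===== SOURCE B (Python) =====
-- def get_story_parts(story):
--     sentences = [s.strip() + '.' for s in story.split('.') if s.strip()]
--     n = len(sentences)
--     buckets = [[], [], []]
--     for i, s in enumerate(sentences):
--         buckets[3 * i // n].append(s)
--     return [' '.join(b) for b in buckets]
-- ===== Notes on version B (the rewrite author's own statement) =====
-- stated objective: alternative
-- what changed: Instead of computing part boundaries and slicing, B makes one pass assigning each cleaned sentence i directly to bucket 3*i//n (the closed-form inverse of balanced 3-way partitioning), so no sizes, offsets or slices are computed.
import Mathlib
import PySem

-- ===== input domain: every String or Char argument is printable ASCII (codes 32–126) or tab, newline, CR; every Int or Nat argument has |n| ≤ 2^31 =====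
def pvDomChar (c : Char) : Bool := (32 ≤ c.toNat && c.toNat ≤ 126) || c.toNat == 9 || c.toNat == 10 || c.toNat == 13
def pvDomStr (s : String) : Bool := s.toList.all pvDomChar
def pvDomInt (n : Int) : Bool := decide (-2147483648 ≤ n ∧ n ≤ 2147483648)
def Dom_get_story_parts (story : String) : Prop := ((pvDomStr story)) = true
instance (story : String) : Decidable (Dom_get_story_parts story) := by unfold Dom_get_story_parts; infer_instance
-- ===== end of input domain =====

-- B assigns each cleaned sentence i to bucket 3*i//n in one pass (no boundaries, no slicing); same cost, different algorithm.

-- ===== PORT A =====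
def get_story_parts (story : String) : List String :=
  let pieces := (PySem.Str.split? story ".").getD []   -- sep "." is nonempty, so split? is always `some`
  let stripped := (pieces.filter (fun s => !(PySem.Str.strip s == ""))).map (fun s => PySem.Str.strip s)
  let sentences := stripped.map (fun s => s ++ ".")
  let n := sentences.length
  let part1 := sentences.take (n / 3 + (if n % 3 > 0 then 1 else 0))
  let part2 := (sentences.drop part1.length).take (n / 3 + (if n % 3 > 1 then 1 else 0))
  let part3 := sentences.drop (part1.length + part2.length)
  [part1, part2, part3].map (fun part => PySem.Str.join " " part)

-- ===== PORT B =====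
-- the loop body: buckets[3*i//n].append(s)
def gspStep (n : Nat) (st : List String × List String × List String) (p : Int × String) :
    List String × List String × List String :=
  let b := PySem.Int.floordiv (3 * p.1) (n : Int)
  if b = 0 then (st.1 ++ [p.2], st.2.1, st.2.2)
  else if b = 1 then (st.1, st.2.1 ++ [p.2], st.2.2)
  else (st.1, st.2.1, st.2.2 ++ [p.2])

def get_story_parts_alt (story : String) : List String :=
  let sentences := (((PySem.Str.split? story ".").getD []).filter
      (fun s => !(PySem.Str.strip s == ""))).map (fun s => PySem.Str.strip s ++ ".")
  let n := sentences.length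
  let buckets := (PySem.List.enumerate sentences 0).foldl (gspStep n) ([], [], [])
  [PySem.Str.join " " buckets.1, PySem.Str.join " " buckets.2.1, PySem.Str.join " " buckets.2.2]

-- ===== PRECONDITION & SPEC =====
def Spec_get_story_parts (story : String) (out : List String) : Prop := out = get_story_parts_alt story
instance (story : String) (out : List String) : Decidable (Spec_get_story_parts story out) := by unfold Spec_get_story_parts; infer_instance

-- ===== CLAIM (what is proved, stated in full; the proofs are below) =====
def Claim_equal_get_story_parts : Prop := ∀ (story : String), Dom_get_story_parts story → Spec_get_story_parts story (get_story_parts story)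

-- ===== LEMMAS AND PROOFS =====

-- the fold scatters the list into the three filters of the bucket key
lemma gspStep_foldl (n : Nat) (xs : List (Int × String)) (a b c : List String) :
    xs.foldl (gspStep n) (a, b, c) =
      (a ++ (xs.filter (fun p => PySem.Int.floordiv (3 * p.1) (n : Int) = 0)).map Prod.snd,
       b ++ (xs.filter (fun p => PySem.Int.floordiv (3 * p.1) (n : Int) = 1)).map Prod.snd,
       c ++ (xs.filter (fun p => ¬ (PySem.Int.floordiv (3 * p.1) (n : Int) = 0) ∧
              ¬ (PySem.Int.floordiv (3 * p.1) (n : Int) = 1))).map Prod.snd) := by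
  induction xs generalizing a b c with
  | nil => simp
  | cons x t ih =>
    simp only [List.foldl_cons, gspStep, List.filter_cons]
    by_cases h0 : PySem.Int.floordiv (3 * x.1) (n : Int) = 0
    · simp [h0, ih, List.append_assoc]
    · by_cases h1 : PySem.Int.floordiv (3 * x.1) (n : Int) = 1
      · simp [h1, ih, List.append_assoc]
      · simp [h0, h1, ih, List.append_assoc]

-- filtering the enumeration by "index < c" is a take
lemma gsp_filter_lt {α : Type} (c : Nat) (xs : List α) : ∀ j : Nat,
    ((PySem.List.enumerate xs (j : Int)).filter (fun p => p.1 < (c : Int))).map Prod.snd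
      = xs.take (c - j) := by
  induction xs with
  | nil => intro j; simp [PySem.List.enumerate_nil]
  | cons x t ih =>
    intro j
    rw [PySem.List.enumerate_cons, List.filter_cons]
    have hcast : ((j : Int) + 1) = ((j + 1 : Nat) : Int) := by push_cast; ring
    rw [hcast]
    by_cases h : (j : Int) < (c : Int)
    · rw [if_pos (by exact decide_eq_true h), List.map_cons, ih (j + 1)]
      have hj : j < c := by exact_mod_cast h
      have e : c - j = (c - (j + 1)) + 1 := by omega
      rw [e, List.take_succ_cons]
    · rw [if_neg (by simp [h]), ih (j + 1)]
      have hj : ¬ j < c := by exact_mod_cast h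
      have e1 : c - j = 0 := by omega
      have e2 : c - (j + 1) = 0 := by omega
      rw [e1, e2]
      simp

-- filtering the enumeration by "c1 ≤ index < c2" is a drop-then-take
lemma gsp_filter_band {α : Type} (c1 c2 : Nat) (xs : List α) : ∀ j : Nat,
    ((PySem.List.enumerate xs (j : Int)).filter
        (fun p => (c1 : Int) ≤ p.1 ∧ p.1 < (c2 : Int))).map Prod.snd
      = (xs.drop (c1 - j)).take (c2 - max j c1) := by
  induction xs with
  | nil => intro j; simp [PySem.List.enumerate_nil]
  | cons x t ih =>
    intro j
    rw [PySem.List.enumerate_cons, List.filter_cons]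
    have hcast : ((j : Int) + 1) = ((j + 1 : Nat) : Int) := by push_cast; ring
    rw [hcast]
    by_cases h1 : (c1 : Int) ≤ (j : Int)
    · by_cases h2 : (j : Int) < (c2 : Int)
      · rw [if_pos (by simp [h1, h2]), List.map_cons, ih (j + 1)]
        have hj1 : c1 ≤ j := by exact_mod_cast h1
        have hj2 : j < c2 := by exact_mod_cast h2
        have e1 : c1 - j = 0 := by omega
        have e2 : c1 - (j + 1) = 0 := by omega
        have e3 : c2 - max j c1 = (c2 - max (j + 1) c1) + 1 := by omega
        rw [e1, e2, e3]
        simp [List.take_succ_cons]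
      · rw [if_neg (by simp [h2]), ih (j + 1)]
        have hj1 : c1 ≤ j := by exact_mod_cast h1
        have hj2 : ¬ j < c2 := by exact_mod_cast h2
        have e3 : c2 - max j c1 = 0 := by omega
        have e4 : c2 - max (j + 1) c1 = 0 := by omega
        rw [e3, e4]
        simp
    · rw [if_neg (by simp [h1]), ih (j + 1)]
      have hj1 : ¬ c1 ≤ j := by exact_mod_cast h1
      have e1 : c1 - j = (c1 - (j + 1)) + 1 := by omega
      have e2 : max j c1 = c1 := by omega
      have e3 : max (j + 1) c1 = c1 := by omega
      rw [e1, e2, e3, List.drop_succ_cons]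

-- filtering the enumeration by "c ≤ index" is a drop
lemma gsp_filter_ge {α : Type} (c : Nat) (xs : List α) : ∀ j : Nat,
    ((PySem.List.enumerate xs (j : Int)).filter (fun p => (c : Int) ≤ p.1)).map Prod.snd
      = xs.drop (c - j) := by
  induction xs with
  | nil => intro j; simp [PySem.List.enumerate_nil]
  | cons x t ih =>
    intro j
    rw [PySem.List.enumerate_cons, List.filter_cons]
    have hcast : ((j : Int) + 1) = ((j + 1 : Nat) : Int) := by push_cast; ring
    rw [hcast]
    by_cases h : (c : Int) ≤ (j : Int)
    · rw [if_pos (by exact decide_eq_true h), List.map_cons, ih (j + 1)]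
      have hj : c ≤ j := by exact_mod_cast h
      have e1 : c - j = 0 := by omega
      have e2 : c - (j + 1) = 0 := by omega
      rw [e1, e2]
      simp
    · rw [if_neg (by simp [h]), ih (j + 1)]
      have hj : ¬ c ≤ j := by exact_mod_cast h
      have e1 : c - j = (c - (j + 1)) + 1 := by omega
      rw [e1, List.drop_succ_cons]

-- bucket-key arithmetic: 3*k/n = 0 / 1 / ≥2 corresponds exactly to A's three index ranges
lemma gsp_d0 (n k : Nat) (hk : k < n) :
    (3 * k / n = 0) ↔ (k < n / 3 + (if 0 < n % 3 then 1 else 0)) := by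
  rw [Nat.div_eq_zero_iff]
  split_ifs <;> omega

lemma gsp_d1 (n k : Nat) (hk : k < n) :
    (3 * k / n = 1) ↔ (n / 3 + (if 0 < n % 3 then 1 else 0) ≤ k ∧
      k < (n / 3 + (if 0 < n % 3 then 1 else 0)) + (n / 3 + (if 1 < n % 3 then 1 else 0))) := by
  have hn : 0 < n := by omega
  have h1 : 1 ≤ 3 * k / n ↔ 1 * n ≤ 3 * k := Nat.le_div_iff_mul_le hn
  have h2 : 3 * k / n < 2 ↔ 3 * k < 2 * n := Nat.div_lt_iff_lt_mul hn
  revert h1 h2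
  generalize 3 * k / n = d
  intro h1 h2
  split_ifs <;> omega

lemma gsp_d2 (n k : Nat) (hk : k < n) :
    (¬ (3 * k / n = 0) ∧ ¬ (3 * k / n = 1)) ↔
      ((n / 3 + (if 0 < n % 3 then 1 else 0)) + (n / 3 + (if 1 < n % 3 then 1 else 0)) ≤ k) := by
  have hn : 0 < n := by omega
  have h1 : 1 ≤ 3 * k / n ↔ 1 * n ≤ 3 * k := Nat.le_div_iff_mul_le hn
  have h2 : 3 * k / n < 2 ↔ 3 * k < 2 * n := Nat.div_lt_iff_lt_mul hn
  revert h1 h2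
  generalize 3 * k / n = d
  intro h1 h2
  split_ifs <;> omega

-- the bucket key of an enumerated element, in Nat form
lemma gsp_key (n : Nat) (p : Int × String) (L : List String)
    (hp : p ∈ PySem.List.enumerate L 0) :
    ∃ k : Nat, k < L.length ∧ p.1 = (k : Int) ∧
      PySem.Int.floordiv (3 * p.1) (n : Int) = ((3 * k / n : Nat) : Int) := by
  obtain ⟨k, hk, hpe⟩ := (PySem.List.mem_enumerate_iff L 0 p).mp hp
  subst hpe
  refine ⟨k, hk, by push_cast; ring, ?_⟩
  have h3 : (3 : Int) * (0 + (k : Int)) = ((3 * k : Nat) : Int) := by push_cast; ring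
  simp only [h3]
  exact PySem.Int.floordiv_natCast (3 * k) n

-- Core: for any sentence list L, A's three slices equal B's bucket fold.
lemma gsp_core (L : List String) :
    [PySem.Str.join " " (L.take (L.length / 3 + (if 0 < L.length % 3 then 1 else 0))),
     PySem.Str.join " " ((L.drop (L.take (L.length / 3 + (if 0 < L.length % 3 then 1 else 0))).length).take
        (L.length / 3 + (if 1 < L.length % 3 then 1 else 0))),
     PySem.Str.join " " (L.drop ((L.take (L.length / 3 + (if 0 < L.length % 3 then 1 else 0))).length +
        ((L.drop (L.take (L.length / 3 + (if 0 < L.length % 3 then 1 else 0))).length).take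
          (L.length / 3 + (if 1 < L.length % 3 then 1 else 0))).length))]
    =
    (fun buckets => [PySem.Str.join " " buckets.1, PySem.Str.join " " buckets.2.1,
        PySem.Str.join " " buckets.2.2])
      ((PySem.List.enumerate L 0).foldl (gspStep L.length) ([], [], [])) := by
  have hm3 : L.length % 3 < 3 := Nat.mod_lt _ (by norm_num)
  have hdm := Nat.div_add_mod L.length 3
  -- abbreviations
  set n := L.length with hn
  set c1 := n / 3 + (if 0 < n % 3 then 1 else 0) with hc1
  set s2 := n / 3 + (if 1 < n % 3 then 1 else 0) with hs2
  have hc1n : c1 ≤ n := by rw [hc1]; split_ifs <;> omega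
  have hc2n : c1 + s2 ≤ n := by rw [hc1, hs2]; split_ifs <;> omega
  -- rewrite B's fold into filters
  rw [gspStep_foldl]
  simp only [List.nil_append]
  -- convert each floordiv predicate into an index-range predicate
  have e0 : List.filter (fun p => decide (PySem.Int.floordiv (3 * p.1) (n : Int) = 0))
        (PySem.List.enumerate L 0)
      = List.filter (fun p => decide (p.1 < ((c1 : Nat) : Int))) (PySem.List.enumerate L 0) := by
    refine List.filter_congr ?_
    intro p hp
    obtain ⟨k, hk, hp1, hfd⟩ := gsp_key n p L hp
    rw [hfd, hp1]
    simp only [decide_eq_decide]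
    exact_mod_cast gsp_d0 n k hk
  have e1 : List.filter (fun p => decide (PySem.Int.floordiv (3 * p.1) (n : Int) = 1))
        (PySem.List.enumerate L 0)
      = List.filter (fun p => decide (((c1 : Nat) : Int) ≤ p.1 ∧ p.1 < ((c1 + s2 : Nat) : Int)))
          (PySem.List.enumerate L 0) := by
    refine List.filter_congr ?_
    intro p hp
    obtain ⟨k, hk, hp1, hfd⟩ := gsp_key n p L hp
    rw [hfd, hp1]
    simp only [decide_eq_decide]
    exact_mod_cast gsp_d1 n k hk
  have e2 : List.filter (fun p => decide (¬ (PySem.Int.floordiv (3 * p.1) (n : Int) = 0) ∧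
          ¬ (PySem.Int.floordiv (3 * p.1) (n : Int) = 1)))
        (PySem.List.enumerate L 0)
      = List.filter (fun p => decide (((c1 + s2 : Nat) : Int) ≤ p.1)) (PySem.List.enumerate L 0) := by
    refine List.filter_congr ?_
    intro p hp
    obtain ⟨k, hk, hp1, hfd⟩ := gsp_key n p L hp
    rw [hfd, hp1]
    simp only [decide_eq_decide]
    exact_mod_cast gsp_d2 n k hk
  rw [e0, e1, e2]
  -- collapse the filters into take/drop
  have f0 := gsp_filter_lt c1 L 0
  have f1 := gsp_filter_band c1 (c1 + s2) L 0
  have f2 := gsp_filter_ge (c1 + s2) L 0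
  simp only [Nat.cast_zero, Nat.sub_zero, Nat.max_eq_right (Nat.zero_le c1),
    Nat.add_sub_cancel_left] at f0 f1 f2
  rw [f0, f1, f2]
  -- match A's slice expressions
  have hlen1 : (L.take c1).length = c1 := by
    rw [List.length_take]; omega
  have hlen2 : ((L.drop c1).take s2).length = s2 := by
    rw [List.length_take, List.length_drop]; omega
  rw [hlen1, hlen2]
-- ===== VERDICT (by name: the statement is the Claim_ definition above) =====
theorem get_story_parts_spec : Claim_equal_get_story_parts := by
  intro story _
  unfold Spec_get_story_parts get_story_parts get_story_parts_alt
  simp only [List.map_map, List.map_cons, List.map_nil]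
  exact gsp_core _
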